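-- pv_equiv track=rewrite | github.com/Ascendral/KlomboAGI | klomboagi/reasoning/arc_dsl_v2.py | keep_most_common_color_objects
-- ===== SOURCE A (Python) =====
-- from collections import Counter
--
-- Grid = list[list[int]]
--
-- def get_bg(grid: Grid) -> int:
--     """Most common color = background."""
--     flat = [c for row in grid for c in row]
--     return Counter(flat).most_common(1)[0][0] if flat else 0
--
-- def find_objects(grid: Grid) -> list[dict]:
--     """Find connected non-bg regions. Returns list of {cells, color, bbox}."""
--     bg = get_bg(grid)
--     rows, cols = len(grid), len(grid[0])
--     visited = [[False] * cols for _ in range(rows)]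
--     objects = []
--
--     for r in range(rows):
--         for c in range(cols):
--             if visited[r][c] or grid[r][c] == bg:
--                 continue
--             # BFS to find connected region of same color
--             color = grid[r][c]
--             cells = []
--             queue = [(r, c)]
--             while queue:
--                 cr, cc = queue.pop(0)
--                 if cr < 0 or cr >= rows or cc < 0 or cc >= cols:
--                     continue
--                 if visited[cr][cc] or grid[cr][cc] != color:
--                     continue
--                 visited[cr][cc] = True
--                 cells.append((cr, cc))
--                 for dr, dc in [(-1, 0), (1, 0), (0, -1), (0, 1)]:
--                     queue.append((cr + dr, cc + dc))
--
--             if cells: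
--                 min_r = min(r for r, c in cells)
--                 max_r = max(r for r, c in cells)
--                 min_c = min(c for r, c in cells)
--                 max_c = max(c for r, c in cells)
--                 objects.append({
--                     "cells": cells,
--                     "color": color,
--                     "bbox": (min_r, min_c, max_r, max_c),
--                     "size": len(cells),
--                 })
--     return objects
--
-- def keep_most_common_color_objects(grid: Grid) -> Grid:
--     """Keep only objects of the most common non-bg color, clear rest."""
--     bg = get_bg(grid)
--     objects = find_objects(grid)
--     if not objects:
--         return grid
--     color_counts = Counter(o["color"] for o in objects)
--     keep_color = color_counts.most_common(1)[0][0]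
--     result = [[bg] * len(grid[0]) for _ in range(len(grid))]
--     for obj in objects:
--         if obj["color"] == keep_color:
--             for r, c in obj["cells"]:
--                 result[r][c] = grid[r][c]
--     return result
-- ===== SOURCE B (Python) =====
-- from collections import Counter, deque
--
--
-- def keep_most_common_color_objects(grid):
--     """Keep only objects of the most common non-bg color, clear rest."""
--     rows, cols = len(grid), len(grid[0])
--     flat = [v for row in grid for v in row]
--     bg = Counter(flat).most_common(1)[0][0] if flat else 0
--     visited = [[False] * cols for _ in range(rows)]
--     tally = Counter()
--     for r in range(rows):
--         for c in range(cols):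
--             if visited[r][c] or grid[r][c] == bg:
--                 continue
--             color = grid[r][c]
--             tally[color] += 1
--             queue = deque([(r, c)])
--             while queue:
--                 cr, cc = queue.popleft()
--                 if cr < 0 or cr >= rows or cc < 0 or cc >= cols:
--                     continue
--                 if visited[cr][cc] or grid[cr][cc] != color:
--                     continue
--                 visited[cr][cc] = True
--                 for dr, dc in ((-1, 0), (1, 0), (0, -1), (0, 1)):
--                     queue.append((cr + dr, cc + dc))
--     if not tally:
--         return grid
--     keep = tally.most_common(1)[0][0]
--     return [[keep if row[c] == keep else bg for c in range(cols)] for row in grid]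
-- ===== Notes on version B (the rewrite author's own statement) =====
-- stated objective: simpler
-- what changed: B drops the whole object-extraction pipeline (per-object cell lists, bboxes, sizes, and the paint-back loop): a deque-based flood fill only marks visited cells while a Counter tallies one hit per component start, and the output is produced by a direct per-cell recolor map (a kept component's cells all carry the winning color, so no stored cells are needed).
import Mathlib
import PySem

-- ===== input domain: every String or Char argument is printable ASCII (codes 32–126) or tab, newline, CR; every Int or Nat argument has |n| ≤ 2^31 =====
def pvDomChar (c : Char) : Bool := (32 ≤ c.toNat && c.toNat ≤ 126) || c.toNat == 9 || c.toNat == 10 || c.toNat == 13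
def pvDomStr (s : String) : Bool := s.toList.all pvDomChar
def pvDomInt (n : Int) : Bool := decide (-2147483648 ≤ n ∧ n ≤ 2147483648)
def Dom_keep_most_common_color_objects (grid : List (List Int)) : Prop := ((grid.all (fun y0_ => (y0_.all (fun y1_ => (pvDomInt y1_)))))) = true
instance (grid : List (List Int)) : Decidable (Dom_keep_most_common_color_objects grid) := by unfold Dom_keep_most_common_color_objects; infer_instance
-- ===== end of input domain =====

-- B replaces A's object-extraction pipeline (cell lists, bboxes, paint-back loop) by a
-- marking flood fill with a per-color component tally and a direct per-cell recolor map;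
-- same return value wherever the Python A returns.

-- shared small helpers (ports of Python built-ins / common accesses)
-- Counter.most_common(1)[0][0]: first key attaining the maximal count, in insertion order
def pvMostCommon1 (d : PySem.Dict Int Int) : Int :=
  match d.items with
  | [] => 0
  | kv :: rest => (rest.foldl (fun best p => if best.2 < p.2 then p else best) kv).1

def pvMget (m : List (List Bool)) (r c : Nat) : Bool := ((m.getD r []).getD c true)
def pvMset (m : List (List Bool)) (r c : Nat) : List (List Bool) := m.set r ((m.getD r []).set c true)
def pvFalseCount (m : List (List Bool)) : Nat := (m.map (fun row => row.count false)).sum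
def pvGval (grid : List (List Int)) (r c : Nat) : Int := ((grid.getD r []).getD c 0)
-- the nested 'for r in range(rows): for c in range(cols):' index sequence
def pvIdxs (rows cols : Nat) : List (Nat × Nat) :=
  (List.range rows).flatMap (fun r => (List.range cols).map (fun c => (r, c)))
def pvInitVis (rows cols : Nat) : List (List Bool) := List.replicate rows (List.replicate cols false)

-- termination helpers for the flood-fill loops (cited in decreasing_by)
theorem pvCountFalseSetLt (row : List Bool) (c : Nat) (hc : c < row.length) (hf : row[c] = false) :
    (row.set c true).count false < row.count false := by
  induction row generalizing c with
  | nil => simp at hc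
  | cons h t ih =>
    cases c with
    | zero => simp_all
    | succ c =>
      simp only [List.set_cons_succ, List.count_cons]
      have := ih c (by simpa using hc) (by simpa using hf)
      omega

theorem pvFalseCount_mset_lt (m : List (List Bool)) (r c : Nat) (h : pvMget m r c = false) :
    pvFalseCount (pvMset m r c) < pvFalseCount m := by
  induction m generalizing r with
  | nil => simp [pvMget] at h
  | cons row t ih =>
    cases r with
    | zero =>
      have hc : c < row.length := by
        by_contra hc
        simp [pvMget, List.getD_eq_getElem?_getD, List.getElem?_eq_none (by omega : row.length ≤ c)] at h
      have hf : row[c] = false := by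
        simpa [pvMget, List.getD_eq_getElem?_getD, List.getElem?_eq_getElem hc] using h
      simp only [pvMset, pvFalseCount, List.getD_cons_zero, List.set_cons_zero, List.map_cons, List.sum_cons]
      have := pvCountFalseSetLt row c hc hf
      omega
    | succ r =>
      have h' : pvMget t r c = false := by simpa [pvMget] using h
      have := ih r h'
      simp only [pvMset, pvFalseCount, List.getD_cons_succ, List.set_cons_succ, List.map_cons, List.sum_cons] at *
      omega

-- ===== PORT A =====

-- object record {cells, color, bbox, size}
structure PvObj where
  cells : List (Int × Int)
  color : Int
  bbox : Int × Int × Int × Int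
  size : Int
deriving Repr, DecidableEq

-- get_bg: Counter(flat).most_common(1)[0][0] if flat else 0
def pvGetBg (grid : List (List Int)) : Int :=
  let flat := grid.flatMap (fun row => row)
  if flat = [] then 0 else pvMostCommon1 (PySem.Dict.counter flat)

-- the 'while queue:' BFS of find_objects (pop(0) from the front, append 4 neighbours)
def pvBfsA (grid : List (List Int)) (rows cols : Nat) (color : Int)
    (q : List (Int × Int)) (vis : List (List Bool)) (cells : List (Int × Int)) :
    List (List Bool) × List (Int × Int) :=
  match q with
  | [] => (vis, cells)
  | (cr, cc) :: rest =>
    if h1 : cr < 0 ∨ (rows : Int) ≤ cr ∨ cc < 0 ∨ (cols : Int) ≤ cc then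
      pvBfsA grid rows cols color rest vis cells
    else if h2 : pvMget vis cr.toNat cc.toNat = true ∨ pvGval grid cr.toNat cc.toNat ≠ color then
      pvBfsA grid rows cols color rest vis cells
    else
      pvBfsA grid rows cols color (rest ++ [(cr - 1, cc), (cr + 1, cc), (cr, cc - 1), (cr, cc + 1)])
        (pvMset vis cr.toNat cc.toNat) (cells ++ [(cr, cc)])
termination_by 5 * pvFalseCount vis + q.length
decreasing_by
  · simp only [List.length_cons]; omega
  · simp only [List.length_cons]; omega
  · have hm : pvMget vis cr.toNat cc.toNat = false := by
      have := (not_or.mp h2).1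
      simpa using this
    have := pvFalseCount_mset_lt vis cr.toNat cc.toNat hm
    simp only [List.length_append, List.length_cons, List.length_nil]
    omega

-- the object record appended by find_objects: cells, color, bbox (min_r,min_c,max_r,max_c), size
def pvMkObj (cells : List (Int × Int)) (color : Int) : PvObj :=
  { cells := cells, color := color,
    bbox := ((PySem.List.min? (cells.map (·.1)) (fun x => x)).getD 0,
             (PySem.List.min? (cells.map (·.2)) (fun x => x)).getD 0,
             (PySem.List.max? (cells.map (·.1)) (fun x => x)).getD 0,
             (PySem.List.max? (cells.map (·.2)) (fun x => x)).getD 0),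
    size := (cells.length : Int) }

-- the nested for-loops of find_objects
def pvLoopA (grid : List (List Int)) (rows cols : Nat) (bg : Int)
    (todo : List (Nat × Nat)) (vis : List (List Bool)) (objs : List PvObj) :
    List (List Bool) × List PvObj :=
  match todo with
  | [] => (vis, objs)
  | (r, c) :: rest =>
    if pvMget vis r c = true ∨ pvGval grid r c = bg then
      pvLoopA grid rows cols bg rest vis objs
    else
      let color := pvGval grid r c
      let st := pvBfsA grid rows cols color [((r : Int), (c : Int))] vis []
      if st.2 = [] then pvLoopA grid rows cols bg rest st.1 objs
      else pvLoopA grid rows cols bg rest st.1 (objs ++ [pvMkObj st.2 color])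

def pvFindObjects (grid : List (List Int)) : List PvObj :=
  let bg := pvGetBg grid
  let rows := grid.length
  let cols := grid.headI.length
  (pvLoopA grid rows cols bg (pvIdxs rows cols) (pvInitVis rows cols) []).2

-- result[r][c] accesses (int indices, as in the Python)
def pvIgetI (g : List (List Int)) (r c : Int) : Int :=
  PySem.List.pyGetD (PySem.List.pyGetD g r []) c 0
def pvIset (m : List (List Int)) (r c : Int) (v : Int) : List (List Int) :=
  PySem.List.pySetD m r (PySem.List.pySetD (PySem.List.pyGetD m r []) c v)

def keep_most_common_color_objects (grid : List (List Int)) : List (List Int) :=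
  let bg := pvGetBg grid
  let objects := pvFindObjects grid
  if objects = [] then grid
  else
    let keep := pvMostCommon1 (PySem.Dict.counter (objects.map (·.color)))
    let result0 := List.replicate grid.length (List.replicate grid.headI.length bg)
    objects.foldl (fun res o =>
      if o.color = keep then
        o.cells.foldl (fun res2 p => pvIset res2 p.1 p.2 (pvIgetI grid p.1 p.2)) res
      else res) result0

-- ===== PORT B =====

-- Source B's flood fill: only marks visited (no cell list is kept)
def pvFloodB (grid : List (List Int)) (rows cols : Nat) (color : Int)
    (q : List (Int × Int)) (vis : List (List Bool)) : List (List Bool) :=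
  match q with
  | [] => vis
  | (cr, cc) :: rest =>
    if h1 : cr < 0 ∨ (rows : Int) ≤ cr ∨ cc < 0 ∨ (cols : Int) ≤ cc then
      pvFloodB grid rows cols color rest vis
    else if h2 : pvMget vis cr.toNat cc.toNat = true ∨ pvGval grid cr.toNat cc.toNat ≠ color then
      pvFloodB grid rows cols color rest vis
    else
      pvFloodB grid rows cols color (rest ++ [(cr - 1, cc), (cr + 1, cc), (cr, cc - 1), (cr, cc + 1)])
        (pvMset vis cr.toNat cc.toNat)
termination_by 5 * pvFalseCount vis + q.length
decreasing_by
  · simp only [List.length_cons]; omega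
  · simp only [List.length_cons]; omega
  · have hm : pvMget vis cr.toNat cc.toNat = false := by
      have := (not_or.mp h2).1
      simpa using this
    have := pvFalseCount_mset_lt vis cr.toNat cc.toNat hm
    simp only [List.length_append, List.length_cons, List.length_nil]
    omega

-- Source B's raster scan: tally one hit per component start, flood to mark the component
def pvLoopB (grid : List (List Int)) (rows cols : Nat) (bg : Int)
    (todo : List (Nat × Nat)) (vis : List (List Bool)) (tally : PySem.Dict Int Int) :
    List (List Bool) × PySem.Dict Int Int :=
  match todo with
  | [] => (vis, tally)
  | (r, c) :: rest =>
    if pvMget vis r c = true ∨ pvGval grid r c = bg then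
      pvLoopB grid rows cols bg rest vis tally
    else
      pvLoopB grid rows cols bg rest
        (pvFloodB grid rows cols (pvGval grid r c) [((r : Int), (c : Int))] vis)
        (tally.modify (pvGval grid r c) 0 (· + 1))

def keep_most_common_color_objects_alt (grid : List (List Int)) : List (List Int) :=
  let rows := grid.length
  let cols := grid.headI.length
  let flat := grid.flatMap (fun row => row)
  let bg := if flat = [] then 0 else pvMostCommon1 (PySem.Dict.counter flat)
  let st := pvLoopB grid rows cols bg (pvIdxs rows cols) (pvInitVis rows cols) PySem.Dict.empty
  if st.2.items = [] then grid
  else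
    let keep := pvMostCommon1 st.2
    grid.map (fun row => (List.range cols).map (fun c => if row.getD c 0 = keep then keep else bg))

-- ===== PRECONDITION & SPEC =====
-- Pre_ excludes exactly the inputs on which the Python A raises IndexError: the empty grid
-- (grid[0]) and grids containing a row shorter than the first row (grid[r][c] out of range).
def Pre_keep_most_common_color_objects (grid : List (List Int)) : Prop :=
  grid ≠ [] ∧ ∀ row ∈ grid, grid.headI.length ≤ row.length
instance (grid : List (List Int)) : Decidable (Pre_keep_most_common_color_objects grid) := by
  unfold Pre_keep_most_common_color_objects; infer_instance
def pvWitness_keep_most_common_color_objects : List (List Int) := [[1, 2], [1, 0]]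

def Spec_keep_most_common_color_objects (grid : List (List Int)) (out : List (List Int)) : Prop := out = keep_most_common_color_objects_alt grid
instance (grid : List (List Int)) (out : List (List Int)) : Decidable (Spec_keep_most_common_color_objects grid out) := by unfold Spec_keep_most_common_color_objects; infer_instance

-- ===== CLAIM (what is proved, stated in full; the proofs are below) =====
def Claim_equal_keep_most_common_color_objects : Prop := ∀ (grid : List (List Int)), Dom_keep_most_common_color_objects grid → Pre_keep_most_common_color_objects grid → Spec_keep_most_common_color_objects grid (keep_most_common_color_objects grid)


theorem pvMget_eq (m : List (List Bool)) (r c : Nat) :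
    pvMget m r c = (m[r]?.getD [])[c]?.getD true := by
  simp [pvMget, List.getD_eq_getElem?_getD]

theorem pvMget_false_bounds (m : List (List Bool)) (r c : Nat) (h : pvMget m r c = false) :
    r < m.length ∧ c < (m[r]?.getD []).length ∧ (m[r]?.getD [])[c]? = some false := by
  rw [pvMget_eq] at h
  rcases hc : (m[r]?.getD [])[c]? with _ | b
  · rw [hc] at h; simp at h
  · rw [hc] at h
    simp at h
    subst h
    have hcl : c < (m[r]?.getD []).length := (List.getElem?_eq_some_iff.mp hc).1
    refine ⟨?_, hcl, rfl⟩
    rcases hm : m[r]? with _ | row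
    · rw [hm] at hcl; simp at hcl
    · exact (List.getElem?_eq_some_iff.mp hm).1

theorem pvMget_mset (m : List (List Bool)) (r c : Nat) (h : pvMget m r c = false) (r' c' : Nat) :
    (pvMget (pvMset m r c) r' c' = true ↔ (pvMget m r' c' = true ∨ (r' = r ∧ c' = c))) := by
  obtain ⟨hr, hc, _⟩ := pvMget_false_bounds m r c h
  by_cases hrr : r' = r
  · have hrow : (pvMset m r c)[r']? = some ((m[r]?.getD []).set c true) := by
      simp only [pvMset, List.getD_eq_getElem?_getD]
      rw [List.getElem?_set, if_pos hrr.symm, if_pos hr]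
    rw [pvMget_eq, hrow]
    simp only [Option.getD_some]
    rw [List.getElem?_set]
    by_cases hcc : c' = c
    · rw [if_pos hcc.symm, if_pos hc]
      simp [hrr, hcc]
    · rw [if_neg (fun hh => hcc hh.symm), hrr]
      rw [pvMget_eq]
      simp [hcc]
  · have hrow : (pvMset m r c)[r']? = m[r']? := by
      simp only [pvMset, List.getD_eq_getElem?_getD]
      rw [List.getElem?_set, if_neg (fun hh => hrr hh.symm)]
    rw [pvMget_eq, hrow, ← pvMget_eq]
    simp [hrr]

theorem pvFloodB_eq (grid : List (List Int)) (rows cols : Nat) (color : Int)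
    (q : List (Int × Int)) (vis : List (List Bool)) (cells : List (Int × Int)) :
    pvFloodB grid rows cols color q vis = (pvBfsA grid rows cols color q vis cells).1 := by
  fun_induction pvBfsA grid rows cols color q vis cells with
  | case1 vis cells => rw [pvFloodB]
  | case2 vis cells cr cc rest h1 ih => rw [pvFloodB]; simp only [dif_pos h1]; exact ih
  | case3 vis cells cr cc rest h1 h2 ih => rw [pvFloodB]; simp only [dif_neg h1, dif_pos h2]; exact ih
  | case4 vis cells cr cc rest h1 h2 ih => rw [pvFloodB]; simp only [dif_neg h1, dif_neg h2]; exact ih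

theorem pvBfsA_spec (grid : List (List Int)) (rows cols : Nat) (color : Int)
    (q : List (Int × Int)) (vis : List (List Bool)) (cells : List (Int × Int)) :
    ∃ Δ : List (Int × Int),
      (pvBfsA grid rows cols color q vis cells).2 = cells ++ Δ ∧
      (∀ p ∈ Δ, ∃ a b : Nat, p = ((a : Int), (b : Int)) ∧ a < rows ∧ b < cols ∧
        pvGval grid a b = color ∧ pvMget vis a b = false) ∧
      (∀ a b : Nat, pvMget (pvBfsA grid rows cols color q vis cells).1 a b = true ↔
        (pvMget vis a b = true ∨ ((a : Int), (b : Int)) ∈ Δ)) := by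
  fun_induction pvBfsA grid rows cols color q vis cells with
  | case1 vis cells => exact ⟨[], by simp⟩
  | case2 vis cells cr cc rest h1 ih => exact ih
  | case3 vis cells cr cc rest h1 h2 ih => exact ih
  | case4 vis cells cr cc rest h1 h2 ih =>
    push_neg at h1
    obtain ⟨hcr0, hcrR, hcc0, hccC⟩ := h1
    have hv : pvMget vis cr.toNat cc.toNat = false := by
      have := (not_or.mp h2).1
      simpa using this
    have hg : pvGval grid cr.toNat cc.toNat = color := by
      have := (not_or.mp h2).2
      simpa using this
    obtain ⟨Δ, hcells, hprops, hvis⟩ := ih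
    refine ⟨(cr, cc) :: Δ, ?_, ?_, ?_⟩
    · rw [hcells]; simp
    · intro p hp
      rcases List.mem_cons.mp hp with hp | hp
      · subst hp
        refine ⟨cr.toNat, cc.toNat, ?_, ?_, ?_, hg, hv⟩
        · rw [Int.toNat_of_nonneg hcr0, Int.toNat_of_nonneg hcc0]
        · omega
        · omega
      · obtain ⟨a, b, hpab, ha, hb, hgab, hvab⟩ := hprops p hp
        refine ⟨a, b, hpab, ha, hb, hgab, ?_⟩
        rcases hx : pvMget vis a b with _ | _
        · rfl
        · rw [(pvMget_mset vis cr.toNat cc.toNat hv a b).mpr (Or.inl hx)] at hvab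
          exact absurd hvab (by simp)
    · intro a b
      rw [hvis a b, pvMget_mset vis cr.toNat cc.toNat hv a b]
      constructor
      · rintro ((h | ⟨ha, hb⟩) | h)
        · exact Or.inl h
        · subst ha; subst hb
          right
          have heq : ((cr.toNat : Int), (cc.toNat : Int)) = (cr, cc) := by
            rw [Int.toNat_of_nonneg hcr0, Int.toNat_of_nonneg hcc0]
          rw [heq]
          exact List.mem_cons_self ..
        · exact Or.inr (List.mem_cons.mpr (Or.inr h))
      · rintro (h | h)
        · exact Or.inl (Or.inl h)
        · rcases List.mem_cons.mp h with h | h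
          · refine Or.inl (Or.inr ?_)
            have h1 : ((a : Int), (b : Int)).1 = (cr, cc).1 := by rw [h]
            have h2' : ((a : Int), (b : Int)).2 = (cr, cc).2 := by rw [h]
            simp at h1 h2'
            omega
          · exact Or.inr h

theorem pvBfs_call_spec (grid : List (List Int)) (rows cols : Nat) (r c : Nat)
    (vis : List (List Bool)) (hr : r < rows) (hc : c < cols)
    (hv : pvMget vis r c = false) :
    ((r : Int), (c : Int)) ∈ (pvBfsA grid rows cols (pvGval grid r c) [((r : Int), (c : Int))] vis []).2 ∧
    (∀ p ∈ (pvBfsA grid rows cols (pvGval grid r c) [((r : Int), (c : Int))] vis []).2,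
      ∃ a b : Nat, p = ((a : Int), (b : Int)) ∧ a < rows ∧ b < cols ∧
        pvGval grid a b = pvGval grid r c ∧ pvMget vis a b = false) ∧
    (∀ a b : Nat, pvMget (pvBfsA grid rows cols (pvGval grid r c) [((r : Int), (c : Int))] vis []).1 a b = true ↔
      (pvMget vis a b = true ∨ ((a : Int), (b : Int)) ∈ (pvBfsA grid rows cols (pvGval grid r c) [((r : Int), (c : Int))] vis []).2)) := by
  have hno1 : ¬((r : Int) < 0 ∨ (rows : Int) ≤ (r : Int) ∨ (c : Int) < 0 ∨ (cols : Int) ≤ (c : Int)) := by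
    push_neg
    refine ⟨by omega, by omega, by omega, by omega⟩
  have hno2 : ¬(pvMget vis ((r : Int)).toNat ((c : Int)).toNat = true ∨
      pvGval grid ((r : Int)).toNat ((c : Int)).toNat ≠ pvGval grid r c) := by
    simp [hv]
  have hstep : pvBfsA grid rows cols (pvGval grid r c) [((r : Int), (c : Int))] vis [] =
      pvBfsA grid rows cols (pvGval grid r c)
        ([] ++ [((r : Int) - 1, (c : Int)), ((r : Int) + 1, (c : Int)), ((r : Int), (c : Int) - 1), ((r : Int), (c : Int) + 1)])
        (pvMset vis ((r : Int)).toNat ((c : Int)).toNat) ([] ++ [((r : Int), (c : Int))]) := by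
    conv_lhs => rw [pvBfsA.eq_def]
    simp only [dif_neg hno1, dif_neg hno2]
  have htn : ((r : Int)).toNat = r := Int.toNat_natCast r
  have hcn : ((c : Int)).toNat = c := Int.toNat_natCast c
  rw [hstep, htn, hcn] at *
  obtain ⟨Δ, hcells, hprops, hvis⟩ := pvBfsA_spec grid rows cols (pvGval grid r c)
    ([] ++ [((r : Int) - 1, (c : Int)), ((r : Int) + 1, (c : Int)), ((r : Int), (c : Int) - 1), ((r : Int), (c : Int) + 1)])
    (pvMset vis r c) ([] ++ [((r : Int), (c : Int))])
  simp only [List.nil_append] at hcells hprops hvis ⊢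
  rw [hcells]
  simp only [List.nil_append, List.singleton_append]
  refine ⟨List.mem_cons_self .., ?_, ?_⟩
  · intro p hp
    rcases List.mem_cons.mp hp with hp | hp
    · exact ⟨r, c, hp, hr, hc, rfl, hv⟩
    · obtain ⟨a, b, hpab, ha, hb, hgab, hvab⟩ := hprops p hp
      refine ⟨a, b, hpab, ha, hb, hgab, ?_⟩
      rcases hx : pvMget vis a b with _ | _
      · rfl
      · rw [(pvMget_mset vis r c hv a b).mpr (Or.inl hx)] at hvab
        exact absurd hvab (by simp)
  · intro a b
    rw [hvis a b, pvMget_mset vis r c hv a b]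
    constructor
    · rintro ((h | ⟨ha, hb⟩) | h)
      · exact Or.inl h
      · subst ha; subst hb
        exact Or.inr (List.mem_cons_self ..)
      · exact Or.inr (List.mem_cons.mpr (Or.inr h))
    · rintro (h | h)
      · exact Or.inl (Or.inl h)
      · rcases List.mem_cons.mp h with h | h
        · refine Or.inl (Or.inr ?_)
          have h1 : ((a : Int), (b : Int)).1 = (((r : Int), (c : Int)) : Int × Int).1 := by rw [h]
          have h2' : ((a : Int), (b : Int)).2 = (((r : Int), (c : Int)) : Int × Int).2 := by rw [h]
          simp at h1 h2'
          omega
        · exact Or.inr h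

theorem pvLoop_sim (grid : List (List Int)) (rows cols : Nat) (bg : Int) :
    ∀ (todo : List (Nat × Nat)) (vis : List (List Bool)) (objs : List PvObj),
      (∀ p ∈ todo, p.1 < rows ∧ p.2 < cols) →
      (∀ r c : Nat, r < rows → c < cols →
        (pvMget vis r c = true ↔ ∃ o ∈ objs, ((r : Int), (c : Int)) ∈ o.cells)) →
      (∀ o ∈ objs, o.color ≠ bg ∧ ∀ p ∈ o.cells, ∃ a b : Nat,
        p = ((a : Int), (b : Int)) ∧ a < rows ∧ b < cols ∧ pvGval grid a b = o.color) →
      (pvLoopB grid rows cols bg todo vis (PySem.Dict.counter (objs.map (·.color)))).1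
          = (pvLoopA grid rows cols bg todo vis objs).1 ∧
      (pvLoopB grid rows cols bg todo vis (PySem.Dict.counter (objs.map (·.color)))).2
          = PySem.Dict.counter ((pvLoopA grid rows cols bg todo vis objs).2.map (·.color)) ∧
      (∀ r c : Nat, r < rows → c < cols →
        (pvMget (pvLoopA grid rows cols bg todo vis objs).1 r c = true ↔
          ∃ o ∈ (pvLoopA grid rows cols bg todo vis objs).2, ((r : Int), (c : Int)) ∈ o.cells)) ∧
      (∀ o ∈ (pvLoopA grid rows cols bg todo vis objs).2, o.color ≠ bg ∧ ∀ p ∈ o.cells, ∃ a b : Nat,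
        p = ((a : Int), (b : Int)) ∧ a < rows ∧ b < cols ∧ pvGval grid a b = o.color) ∧
      (∀ p ∈ todo, pvGval grid p.1 p.2 ≠ bg →
        pvMget (pvLoopA grid rows cols bg todo vis objs).1 p.1 p.2 = true) ∧
      (∀ r c : Nat, pvMget vis r c = true →
        pvMget (pvLoopA grid rows cols bg todo vis objs).1 r c = true) := by
  intro todo
  induction todo with
  | nil =>
    intro vis objs _ H1 H2
    exact ⟨rfl, rfl, H1, H2, by simp, fun r c h => h⟩
  | cons p rest ih =>
    obtain ⟨r, c⟩ := p
    intro vis objs htodo H1 H2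
    have hr : r < rows := (htodo (r, c) (List.mem_cons_self ..)).1
    have hc : c < cols := (htodo (r, c) (List.mem_cons_self ..)).2
    have htodo' : ∀ p ∈ rest, p.1 < rows ∧ p.2 < cols :=
      fun p hp => htodo p (List.mem_cons.mpr (Or.inr hp))
    by_cases hcond : pvMget vis r c = true ∨ pvGval grid r c = bg
    · simp only [pvLoopA, pvLoopB, if_pos hcond]
      obtain ⟨c1, c2, c3, c4, c5, c6⟩ := ih vis objs htodo' H1 H2
      refine ⟨c1, c2, c3, c4, ?_, c6⟩
      intro p hp hbgp
      rcases List.mem_cons.mp hp with hp | hp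
      · subst hp
        rcases hcond with hcond | hcond
        · exact c6 r c hcond
        · exact absurd hcond hbgp
      · exact c5 p hp hbgp
    · push_neg at hcond
      obtain ⟨hv', hbg⟩ := hcond
      have hv : pvMget vis r c = false := by simpa using hv'
      obtain ⟨hmem, hprops, hiff⟩ := pvBfs_call_spec grid rows cols r c vis hr hc hv
      have hne : (pvBfsA grid rows cols (pvGval grid r c) [((r : Int), (c : Int))] vis []).2 ≠ [] :=
        fun h => by rw [h] at hmem; exact absurd hmem (by simp)
      simp only [pvLoopA, pvLoopB, if_neg (by push_neg; exact ⟨hv', hbg⟩ :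
        ¬(pvMget vis r c = true ∨ pvGval grid r c = bg)), if_neg hne]
      rw [pvFloodB_eq grid rows cols (pvGval grid r c) [((r : Int), (c : Int))] vis []]
      set st := pvBfsA grid rows cols (pvGval grid r c) [((r : Int), (c : Int))] vis [] with hst
      set obj : PvObj := pvMkObj st.2 (pvGval grid r c) with hobj
      have H1' : ∀ a b : Nat, a < rows → b < cols →
          (pvMget st.1 a b = true ↔ ∃ o ∈ objs ++ [obj], ((a : Int), (b : Int)) ∈ o.cells) := by
        intro a b ha hb
        rw [hiff a b]
        constructor
        · rintro (h | h)
          · obtain ⟨o, ho, hpo⟩ := (H1 a b ha hb).mp h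
            exact ⟨o, List.mem_append.mpr (Or.inl ho), hpo⟩
          · exact ⟨obj, List.mem_append.mpr (Or.inr (List.mem_cons_self ..)), h⟩
        · rintro ⟨o, ho, hpo⟩
          rcases List.mem_append.mp ho with ho | ho
          · exact Or.inl ((H1 a b ha hb).mpr ⟨o, ho, hpo⟩)
          · have : o = obj := by simpa using ho
            subst this
            exact Or.inr hpo
      have H2' : ∀ o ∈ objs ++ [obj], o.color ≠ bg ∧ ∀ p ∈ o.cells, ∃ a b : Nat,
          p = ((a : Int), (b : Int)) ∧ a < rows ∧ b < cols ∧ pvGval grid a b = o.color := by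
        intro o ho
        rcases List.mem_append.mp ho with ho | ho
        · exact H2 o ho
        · have : o = obj := by simpa using ho
          subst this
          refine ⟨hbg, ?_⟩
          intro p hp
          obtain ⟨a, b, hpab, ha, hb, hgab, _⟩ := hprops p hp
          exact ⟨a, b, hpab, ha, hb, hgab⟩
      have hcnt : (PySem.Dict.counter (objs.map (·.color))).modify (pvGval grid r c) 0 (· + 1)
          = PySem.Dict.counter ((objs ++ [obj]).map (·.color)) := by
        rw [List.map_append]
        simp only [hobj, pvMkObj, List.map_cons, List.map_nil]
        rw [PySem.Dict.counter_append_singleton]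
      rw [hcnt]
      obtain ⟨c1, c2, c3, c4, c5, c6⟩ := ih st.1 (objs ++ [obj]) htodo' H1' H2'
      have hself : pvMget st.1 r c = true := (hiff r c).mpr (Or.inr hmem)
      refine ⟨c1, c2, c3, c4, ?_, ?_⟩
      · intro p hp hbgp
        rcases List.mem_cons.mp hp with hp | hp
        · subst hp
          exact c6 r c hself
        · exact c5 p hp hbgp
      · intro a b hab
        exact c6 a b ((hiff a b).mpr (Or.inl hab))

theorem pvMem_idxs (rows cols : Nat) (p : Nat × Nat) :
    p ∈ pvIdxs rows cols ↔ p.1 < rows ∧ p.2 < cols := by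
  obtain ⟨r, c⟩ := p
  simp only [pvIdxs, List.mem_flatMap, List.mem_map, List.mem_range]
  constructor
  · rintro ⟨a, ha, b, hb, he⟩
    obtain ⟨h1, h2⟩ := Prod.mk.injEq .. ▸ he
    simp_all
  · rintro ⟨hr, hc⟩
    exact ⟨r, hr, c, hc, rfl⟩

theorem pvMget_init (rows cols r c : Nat) (hr : r < rows) (hc : c < cols) :
    pvMget (pvInitVis rows cols) r c = false := by
  rw [pvMget_eq]
  simp [pvInitVis, List.getElem?_replicate, hr, hc]

theorem pvFoldPick_mem (l : List (Int × Int)) (b : Int × Int) :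
    l.foldl (fun best p => if best.2 < p.2 then p else best) b = b ∨
    l.foldl (fun best p => if best.2 < p.2 then p else best) b ∈ l := by
  induction l generalizing b with
  | nil => exact Or.inl rfl
  | cons h t ih =>
    simp only [List.foldl_cons]
    rcases ih (if b.2 < h.2 then h else b) with h1 | h1
    · rw [h1]
      by_cases hb : b.2 < h.2
      · rw [if_pos hb]; exact Or.inr (List.mem_cons_self ..)
      · rw [if_neg hb]; exact Or.inl rfl
    · exact Or.inr (List.mem_cons.mpr (Or.inr h1))

theorem pvMostCommon1_mem (d : PySem.Dict Int Int) (h : d.items ≠ []) :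
    pvMostCommon1 d ∈ d.keys := by
  unfold pvMostCommon1
  rcases hd : d.items with _ | ⟨kv, rest⟩
  · exact absurd hd h
  · have hmem : rest.foldl (fun best p => if best.2 < p.2 then p else best) kv ∈ kv :: rest := by
      rcases pvFoldPick_mem rest kv with h1 | h1
      · rw [h1]; exact List.mem_cons_self ..
      · exact List.mem_cons.mpr (Or.inr h1)
    have : rest.foldl (fun best p => if best.2 < p.2 then p else best) kv ∈ d.items := by
      rw [hd]; exact hmem
    simp only [PySem.Dict.keys]
    exact List.mem_map.mpr ⟨_, this, rfl⟩

theorem pvCounterItemsNil (xs : List Int) : (PySem.Dict.counter xs).items = [] ↔ xs = [] := by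
  constructor
  · intro h
    rcases hx : xs with _ | ⟨x, t⟩
    · rfl
    · exfalso
      rw [hx, PySem.Dict.items_counter] at h
      have hm : x ∈ PySem.Set.ofList (x :: t) := (PySem.Set.mem_ofList _ _).mpr (List.mem_cons_self ..)
      rw [List.map_eq_nil_iff.mp h] at hm
      simp at hm
  · rintro rfl; rfl

-- shape invariant for the painted result matrix
def pvInv (grid : List (List Int)) (m : List (List Int)) : Prop :=
  m.length = grid.length ∧ ∀ r : Nat, r < grid.length → (m[r]?.getD []).length = grid.headI.length

theorem pvIget_natCast (g : List (List Int)) (a b : Nat) :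
    pvIgetI g (a : Int) (b : Int) = pvGval g a b := by
  simp [pvIgetI, pvGval, PySem.List.pyGetD_natCast, List.getD_eq_getElem?_getD]

theorem pvIset_natCast (m : List (List Int)) (a b : Nat) (v : Int) :
    pvIset m (a : Int) (b : Int) v = m.set a ((m.getD a []).set b v) := by
  simp [pvIset, PySem.List.pySetD_natCast, PySem.List.pyGetD_natCast]

theorem pvGvalI_eq (m : List (List Int)) (r c : Nat) :
    pvGval m r c = (m[r]?.getD [])[c]?.getD 0 := by
  simp [pvGval, List.getD_eq_getElem?_getD]

theorem pvInv_set (grid m : List (List Int)) (hm : pvInv grid m) (a b : Nat) (v : Int) :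
    pvInv grid (m.set a ((m.getD a []).set b v)) := by
  obtain ⟨hlen, hrow⟩ := hm
  refine ⟨by simpa using hlen, ?_⟩
  intro r hr
  rw [List.getElem?_set]
  by_cases hra : a = r
  · subst hra
    by_cases hal : a < m.length
    · rw [if_pos rfl, if_pos hal]
      simp only [Option.getD_some, List.length_set]
      rw [List.getD_eq_getElem?_getD]
      exact hrow a hr
    · omega
  · rw [if_neg hra]
    exact hrow r hr

theorem pvGval_set (grid m : List (List Int)) (hm : pvInv grid m) (a b : Nat)
    (ha : a < grid.length) (hb : b < grid.headI.length) (v : Int) (r c : Nat) :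
    pvGval (m.set a ((m.getD a []).set b v)) r c = if r = a ∧ c = b then v else pvGval m r c := by
  obtain ⟨hlen, hrow⟩ := hm
  have hbl : b < (m.getD a []).length := by
    rw [List.getD_eq_getElem?_getD, hrow a ha]
    exact hb
  rw [pvGvalI_eq, pvGvalI_eq, List.getElem?_set]
  by_cases hra : a = r
  · subst hra
    rw [if_pos rfl, if_pos (by omega : a < m.length)]
    simp only [Option.getD_some]
    rw [List.getElem?_set]
    by_cases hcb : b = c
    · subst hcb
      rw [if_pos rfl, if_pos hbl]
      simp
    · rw [if_neg hcb, if_neg (fun h => hcb h.2.symm)]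
      rfl
  · rw [if_neg hra, if_neg (fun h => hra h.1.symm)]

theorem pvPaintCells (grid : List (List Int)) :
    ∀ (cs : List (Int × Int)) (m : List (List Int)), pvInv grid m →
    (∀ p ∈ cs, ∃ a b : Nat, p = ((a : Int), (b : Int)) ∧ a < grid.length ∧ b < grid.headI.length) →
    pvInv grid (cs.foldl (fun res2 p => pvIset res2 p.1 p.2 (pvIgetI grid p.1 p.2)) m) ∧
    (∀ r c : Nat,
      pvGval (cs.foldl (fun res2 p => pvIset res2 p.1 p.2 (pvIgetI grid p.1 p.2)) m) r c =
        if ∃ p ∈ cs, p = ((r : Int), (c : Int)) then pvGval grid r c else pvGval m r c) := by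
  intro cs
  induction cs with
  | nil =>
    intro m hm _
    refine ⟨hm, ?_⟩
    intro r c
    simp
  | cons p rest ih =>
    intro m hm hprops
    obtain ⟨a, b, hpab, ha, hb⟩ := hprops p (List.mem_cons_self ..)
    subst hpab
    simp only [List.foldl_cons, pvIget_natCast, pvIset_natCast]
    obtain ⟨ih1, ih2⟩ := ih (m.set a ((m.getD a []).set b (pvGval grid a b)))
      (pvInv_set grid m hm a b (pvGval grid a b))
      (fun p hp => hprops p (List.mem_cons.mpr (Or.inr hp)))
    refine ⟨ih1, ?_⟩
    intro r c
    rw [ih2 r c, pvGval_set grid m hm a b ha hb (pvGval grid a b) r c]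
    by_cases hin : ∃ p ∈ rest, p = ((r : Int), (c : Int))
    · rw [if_pos hin, if_pos ⟨_, ⟨List.mem_cons.mpr (Or.inr hin.choose_spec.1), hin.choose_spec.2⟩⟩]
    · rw [if_neg hin]
      by_cases hab : r = a ∧ c = b
      · rw [if_pos (show ∃ p ∈ ((a : Int), (b : Int)) :: rest, p = ((r : Int), (c : Int)) from
          ⟨((a : Int), (b : Int)), List.mem_cons_self .., by rw [hab.1, hab.2]⟩), if_pos hab]
        rw [hab.1, hab.2]
      · rw [if_neg hab]
        rw [if_neg ?hno]
        case hno =>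
          rintro ⟨q, hq, hqe⟩
          rcases List.mem_cons.mp hq with hq | hq
          · subst hq
            have h1 : ((a : Int), (b : Int)).1 = (((r : Int), (c : Int)) : Int × Int).1 := by rw [hqe]
            have h2 : ((a : Int), (b : Int)).2 = (((r : Int), (c : Int)) : Int × Int).2 := by rw [hqe]
            simp at h1 h2
            exact hab ⟨h1.symm, h2.symm⟩
          · exact hin ⟨q, hq, hqe⟩

theorem pvPaintObjs (grid : List (List Int)) (keepv : Int) :
    ∀ (objs : List PvObj) (m : List (List Int)), pvInv grid m →
    (∀ o ∈ objs, ∀ p ∈ o.cells, ∃ a b : Nat, p = ((a : Int), (b : Int)) ∧ a < grid.length ∧ b < grid.headI.length) →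
    pvInv grid (objs.foldl (fun res o => if o.color = keepv then
        o.cells.foldl (fun res2 p => pvIset res2 p.1 p.2 (pvIgetI grid p.1 p.2)) res else res) m) ∧
    (∀ r c : Nat,
      pvGval (objs.foldl (fun res o => if o.color = keepv then
        o.cells.foldl (fun res2 p => pvIset res2 p.1 p.2 (pvIgetI grid p.1 p.2)) res else res) m) r c =
        if ∃ o ∈ objs, o.color = keepv ∧ ((r : Int), (c : Int)) ∈ o.cells
        then pvGval grid r c else pvGval m r c) := by
  intro objs
  induction objs with
  | nil =>
    intro m hm _
    refine ⟨hm, fun r c => ?_⟩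
    simp
  | cons o rest ih =>
    intro m hm hprops
    simp only [List.foldl_cons]
    by_cases hco : o.color = keepv
    · rw [if_pos hco]
      obtain ⟨p1, p2⟩ := pvPaintCells grid o.cells m hm (hprops o (List.mem_cons_self ..))
      obtain ⟨ih1, ih2⟩ := ih _ p1 (fun o' ho' => hprops o' (List.mem_cons.mpr (Or.inr ho')))
      refine ⟨ih1, ?_⟩
      intro r c
      rw [ih2 r c, p2 r c]
      by_cases hin : ∃ o' ∈ rest, o'.color = keepv ∧ ((r : Int), (c : Int)) ∈ o'.cells
      · rw [if_pos hin, if_pos ?hyes]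
        case hyes =>
          obtain ⟨o', ho', hc', hp'⟩ := hin
          exact ⟨o', List.mem_cons.mpr (Or.inr ho'), hc', hp'⟩
      · rw [if_neg hin]
        by_cases hself : ∃ p ∈ o.cells, p = ((r : Int), (c : Int))
        · rw [if_pos hself, if_pos ?hy2]
          case hy2 =>
            obtain ⟨p, hp, hpe⟩ := hself
            exact ⟨o, List.mem_cons_self .., hco, hpe ▸ hp⟩
        · rw [if_neg hself, if_neg ?hn2]
          case hn2 =>
            rintro ⟨o', ho', hc', hp'⟩
            rcases List.mem_cons.mp ho' with ho' | ho'
            · subst ho'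
              exact hself ⟨_, hp', rfl⟩
            · exact hin ⟨o', ho', hc', hp'⟩
    · rw [if_neg hco]
      obtain ⟨ih1, ih2⟩ := ih m hm (fun o' ho' => hprops o' (List.mem_cons.mpr (Or.inr ho')))
      refine ⟨ih1, ?_⟩
      intro r c
      rw [ih2 r c]
      by_cases hin : ∃ o' ∈ rest, o'.color = keepv ∧ ((r : Int), (c : Int)) ∈ o'.cells
      · rw [if_pos hin, if_pos ?hy3]
        case hy3 =>
          obtain ⟨o', ho', hc', hp'⟩ := hin
          exact ⟨o', List.mem_cons.mpr (Or.inr ho'), hc', hp'⟩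
      · rw [if_neg hin, if_neg ?hn3]
        case hn3 =>
          rintro ⟨o', ho', hc', hp'⟩
          rcases List.mem_cons.mp ho' with ho' | ho'
          · subst ho'
            exact hco hc'
          · exact hin ⟨o', ho', hc', hp'⟩

theorem pvGval_getElem (m : List (List Int)) (r c : Nat) (hr : r < m.length)
    (hc : c < m[r].length) : pvGval m r c = m[r][c] := by
  rw [pvGvalI_eq, List.getElem?_eq_getElem hr]
  simp only [Option.getD_some]
  rw [List.getElem?_eq_getElem hc]
  rfl

theorem pvFinal (grid : List (List Int)) (vis : List (List Bool)) (objects : List PvObj) (bg : Int)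
    (c3 : ∀ r c : Nat, r < grid.length → c < grid.headI.length →
      (pvMget vis r c = true ↔ ∃ o ∈ objects, ((r : Int), (c : Int)) ∈ o.cells))
    (c4 : ∀ o ∈ objects, o.color ≠ bg ∧ ∀ p ∈ o.cells, ∃ a b : Nat,
      p = ((a : Int), (b : Int)) ∧ a < grid.length ∧ b < grid.headI.length ∧ pvGval grid a b = o.color)
    (c5 : ∀ r c : Nat, r < grid.length → c < grid.headI.length →
      pvGval grid r c ≠ bg → pvMget vis r c = true) :
    (if objects = [] then grid
     else List.foldl (fun res o =>
        if o.color = pvMostCommon1 (PySem.Dict.counter (objects.map (·.color))) then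
          List.foldl (fun res2 p => pvIset res2 p.1 p.2 (pvIgetI grid p.1 p.2)) res o.cells
        else res)
       (List.replicate grid.length (List.replicate grid.headI.length bg)) objects)
    = (if (PySem.Dict.counter (objects.map (·.color))).items = [] then grid
       else grid.map (fun row => (List.range grid.headI.length).map
         (fun c => if row.getD c 0 = pvMostCommon1 (PySem.Dict.counter (objects.map (·.color)))
                   then pvMostCommon1 (PySem.Dict.counter (objects.map (·.color))) else bg))) := by
  by_cases hobj : objects = []
  · rw [if_pos hobj, hobj]
    rw [if_pos (by simp [pvCounterItemsNil])]
  · rw [if_neg hobj]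
    rw [if_neg (fun h => hobj (by
      have := (pvCounterItemsNil _).mp h
      simpa using this))]
    set keepv := pvMostCommon1 (PySem.Dict.counter (objects.map (·.color))) with hkeepv
    -- keepv is one of the object colors, hence ≠ bg
    have hkeep_col : ∃ o ∈ objects, o.color = keepv := by
      have h1 : keepv ∈ (PySem.Dict.counter (objects.map (·.color))).keys :=
        pvMostCommon1_mem _ (fun h => hobj (by
          have := (pvCounterItemsNil _).mp h
          simpa using this))
      rw [PySem.Dict.keys_counter] at h1
      have h2 : keepv ∈ objects.map (·.color) := (PySem.Set.mem_ofList _ _).mp h1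
      obtain ⟨o, ho, hoc⟩ := List.mem_map.mp h2
      exact ⟨o, ho, hoc⟩
    have hkeep_ne : keepv ≠ bg := by
      obtain ⟨o, ho, hoc⟩ := hkeep_col
      rw [← hoc]
      exact (c4 o ho).1
    have hInv0 : pvInv grid (List.replicate grid.length (List.replicate grid.headI.length bg)) := by
      refine ⟨by simp, ?_⟩
      intro r hr
      rw [List.getElem?_replicate, if_pos hr]
      simp
    obtain ⟨hfin_inv, hfin⟩ := pvPaintObjs grid keepv objects
      (List.replicate grid.length (List.replicate grid.headI.length bg)) hInv0
      (by
        intro o ho p hp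
        obtain ⟨a, b, hpe, ha, hb, _⟩ := (c4 o ho).2 p hp
        exact ⟨a, b, hpe, ha, hb⟩)
    have hcov : ∀ r c : Nat, r < grid.length → c < grid.headI.length →
        ((∃ o ∈ objects, o.color = keepv ∧ ((r : Int), (c : Int)) ∈ o.cells) ↔ pvGval grid r c = keepv) := by
      intro r c hr hc
      constructor
      · rintro ⟨o, ho, hoc, hpo⟩
        obtain ⟨a, b, hpe, ha, hb, hg⟩ := (c4 o ho).2 _ hpo
        have h1 : ((r : Int), (c : Int)).1 = (((a : Int), (b : Int)) : Int × Int).1 := by rw [hpe]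
        have h2 : ((r : Int), (c : Int)).2 = (((a : Int), (b : Int)) : Int × Int).2 := by rw [hpe]
        simp at h1 h2
        rw [h1, h2, hg, hoc]
      · intro hg
        have hbgne : pvGval grid r c ≠ bg := by rw [hg]; exact hkeep_ne
        have hvisited := c5 r c hr hc hbgne
        obtain ⟨o, ho, hpo⟩ := (c3 r c hr hc).mp hvisited
        obtain ⟨a, b, hpe, ha, hb, hga⟩ := (c4 o ho).2 _ hpo
        have h1 : ((r : Int), (c : Int)).1 = (((a : Int), (b : Int)) : Int × Int).1 := by rw [hpe]
        have h2 : ((r : Int), (c : Int)).2 = (((a : Int), (b : Int)) : Int × Int).2 := by rw [hpe]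
        simp at h1 h2
        refine ⟨o, ho, ?_, hpo⟩
        rw [← hga, ← h1, ← h2]
        exact hg
    -- final list extensionality
    apply List.ext_getElem
    · rw [hfin_inv.1]
      simp
    · intro r hrL hrR
      have hr : r < grid.length := by rw [hfin_inv.1] at hrL; exact hrL
      apply List.ext_getElem
      · have hl : _ = grid.headI.length := hfin_inv.2 r hr
        rw [List.getElem?_eq_getElem hrL] at hl
        simp only [Option.getD_some] at hl
        rw [hl]
        simp [List.getElem_map]
      · intro c hcL hcR
        have hc : c < grid.headI.length := by
          have hl : _ = grid.headI.length := hfin_inv.2 r hr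
          rw [List.getElem?_eq_getElem hrL] at hl
          simp only [Option.getD_some] at hl
          omega
        have hLHS := hfin r c
        rw [pvGval_getElem _ r c hrL hcL] at hLHS
        rw [hLHS]
        have hRHS : (grid.map (fun row => (List.range grid.headI.length).map
            (fun c => if row.getD c 0 = keepv then keepv else bg)))[r][c]
            = (if pvGval grid r c = keepv then keepv else bg) := by
          have hgg : grid[r].getD c 0 = pvGval grid r c := by
            rw [pvGvalI_eq, List.getElem?_eq_getElem hr]
            simp only [Option.getD_some]
            rw [List.getD_eq_getElem?_getD]
          simp only [List.getElem_map, List.getElem_range]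
          rw [hgg]
        rw [hRHS]
        by_cases hcase : pvGval grid r c = keepv
        · rw [if_pos ((hcov r c hr hc).mpr hcase), if_pos hcase, hcase]
        · rw [if_neg (fun hx => hcase ((hcov r c hr hc).mp hx)), if_neg hcase]
          rw [pvGvalI_eq, List.getElem?_replicate, if_pos hr]
          simp only [Option.getD_some]
          rw [List.getElem?_replicate, if_pos hc]
          rfl

theorem pv_main (grid : List (List Int)) :
    keep_most_common_color_objects grid = keep_most_common_color_objects_alt grid := by
  obtain ⟨c1, c2, c3, c4, c5, c6⟩ := pvLoop_sim grid grid.length grid.headI.length (pvGetBg grid)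
    (pvIdxs grid.length grid.headI.length) (pvInitVis grid.length grid.headI.length) []
    (fun p hp => (pvMem_idxs grid.length grid.headI.length p).mp hp)
    (by
      intro r c hr hc
      rw [pvMget_init grid.length grid.headI.length r c hr hc]
      simp)
    (by intro o ho; simp at ho)
  simp only [keep_most_common_color_objects, keep_most_common_color_objects_alt, pvFindObjects]
  rw [show (if grid.flatMap (fun row => row) = [] then (0 : Int)
      else pvMostCommon1 (PySem.Dict.counter (grid.flatMap (fun row => row)))) = pvGetBg grid from rfl]
  rw [show (PySem.Dict.empty : PySem.Dict Int Int)
      = PySem.Dict.counter (List.map (fun x => x.color) ([] : List PvObj)) from rfl]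
  rw [c2]
  exact pvFinal grid _ _ (pvGetBg grid) c3 c4
    (fun r c hr hc hbg => c5 (r, c) ((pvMem_idxs _ _ _).mpr ⟨hr, hc⟩) hbg)

-- ===== VERDICT (by name: the statement is the Claim_ definition above) =====
theorem keep_most_common_color_objects_spec : Claim_equal_keep_most_common_color_objects := by
  intro grid _ _
  unfold Spec_keep_most_common_color_objects
  exact pv_main grid
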